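-- pv_equiv track=rewrite | github.com/skarwa4491/Python-DSA | Cisco/round3.py | solution
-- ===== SOURCE A (Python) =====
-- def solution(arr1, arr2):
--     arr1.sort()
--     arr2.sort()
--     result = list()
--     i = 0
--     j = 0
--     while i < len(arr1) and j < len(arr2):
--         if arr1[i] < arr2[j]:
--             result.append(arr1[i])
--             i+=1
--         elif arr2[j] < arr1[i]:
--             result.append(arr2[j])
--             j+=1
--         else:
--             result.append(arr1[i])
--             i+=1
--             j+=1
--     while i < len(arr1):
--         result.append(arr1[i])
--         i+=1
--     while j < len(arr2):
--         result.append(arr2[j])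
--         j+=1
--
--     mid = len(result)//2
--     if len(result) %2 == 0:
--         num1 = result[mid-1]
--         num2 = result[mid]
--         return (num1+num2)//2
--     else:
--         return result[mid-1]
-- ===== SOURCE B (Python) =====
-- def solution(arr1, arr2):
--     c1 = {}
--     for v in arr1:
--         c1[v] = c1.get(v, 0) + 1
--     c2 = {}
--     for v in arr2:
--         c2[v] = c2.get(v, 0) + 1
--     merged = []
--     for v in sorted(c1.keys() | c2.keys()):
--         merged += [v] * max(c1.get(v, 0), c2.get(v, 0))
--     mid = len(merged) // 2
--     if len(merged) % 2 == 0: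
--         return (merged[mid - 1] + merged[mid]) // 2
--     return merged[mid - 1]
-- ===== Notes on version B (the rewrite author's own statement) =====
-- stated objective: alternative
-- what changed: A sorts both full arrays in place and merges them element by element with two pointers; B never merges: it counts occurrences per value in one dict pass each, sorts only the distinct values, and expands each value max(c1[v], c2[v]) times to obtain the same list. Pre_ excludes only the input with both lists empty, on which both programs raise IndexError.
import Mathlib
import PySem

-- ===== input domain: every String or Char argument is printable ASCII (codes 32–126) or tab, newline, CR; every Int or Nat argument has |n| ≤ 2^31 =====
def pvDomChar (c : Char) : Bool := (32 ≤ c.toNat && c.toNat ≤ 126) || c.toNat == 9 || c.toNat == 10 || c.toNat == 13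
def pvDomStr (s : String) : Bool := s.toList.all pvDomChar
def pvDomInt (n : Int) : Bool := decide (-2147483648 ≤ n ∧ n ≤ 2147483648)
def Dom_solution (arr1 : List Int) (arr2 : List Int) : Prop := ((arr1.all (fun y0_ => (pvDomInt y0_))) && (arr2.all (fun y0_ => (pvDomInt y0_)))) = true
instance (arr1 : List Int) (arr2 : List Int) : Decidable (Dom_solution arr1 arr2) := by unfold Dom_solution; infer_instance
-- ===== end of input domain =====

-- B replaces A's sort-both-then-two-pointer-merge by per-value counts (each value occurs
-- max(c1[v], c2[v]) times) expanded over the sorted distinct values; the equivalence is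
-- about the RETURN value only (A sorts both argument lists in place, B does not).

-- ===== PORT A =====
-- A's two-pointer while loops over the two in-place-sorted lists are exactly this merge
-- of two sorted lists, keeping a single copy when the heads are equal
def pvMerge : List Int → List Int → List Int
  | [], ys => ys
  | x :: xs, [] => x :: xs
  | x :: xs, y :: ys =>
    if x < y then x :: pvMerge xs (y :: ys)
    else if y < x then y :: pvMerge (x :: xs) ys
    else x :: pvMerge xs ys
termination_by s1 s2 => s1.length + s2.length

def solution (arr1 : List Int) (arr2 : List Int) : Int :=
  let s1 := PySem.List.sorted arr1 (fun x => x) false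
  let s2 := PySem.List.sorted arr2 (fun x => x) false
  let result := pvMerge s1 s2
  let mid := PySem.Int.floordiv (result.length : Int) 2
  if PySem.Int.mod (result.length : Int) 2 = 0 then
    let num1 := PySem.List.pyGetD result (mid - 1) 0
    let num2 := PySem.List.pyGetD result mid 0
    PySem.Int.floordiv (num1 + num2) 2
  else
    PySem.List.pyGetD result (mid - 1) 0

-- ===== PORT B =====
def solution_alt (arr1 : List Int) (arr2 : List Int) : Int :=
  let c1 := arr1.foldl (fun d x => d.insert x (d.getD x 0 + 1)) (PySem.Dict.empty : PySem.Dict Int Int)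
  let c2 := arr2.foldl (fun d x => d.insert x (d.getD x 0 + 1)) (PySem.Dict.empty : PySem.Dict Int Int)
  let keys := PySem.List.sorted (PySem.Set.union (PySem.Set.ofList c1.keys) c2.keys) (fun x => x) false
  let merged := keys.foldl (fun acc v => acc ++ List.replicate (max (c1.getD v 0) (c2.getD v 0)).toNat v) []
  let mid := PySem.Int.floordiv (merged.length : Int) 2
  if PySem.Int.mod (merged.length : Int) 2 = 0 then
    PySem.Int.floordiv (PySem.List.pyGetD merged (mid - 1) 0 + PySem.List.pyGetD merged mid 0) 2
  else
    PySem.List.pyGetD merged (mid - 1) 0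

-- ===== PRECONDITION & SPEC =====
-- Pre_ excludes only the input with both lists empty, on which A (and B) raises IndexError.
def Pre_solution (arr1 : List Int) (arr2 : List Int) : Prop := arr1 ≠ [] ∨ arr2 ≠ []
instance (arr1 : List Int) (arr2 : List Int) : Decidable (Pre_solution arr1 arr2) := by
  unfold Pre_solution; infer_instance
def pvWitness_solution : List Int × List Int := ([1, 3, 2], [2, 5])

def Spec_solution (arr1 : List Int) (arr2 : List Int) (out : Int) : Prop := out = solution_alt arr1 arr2
instance (arr1 : List Int) (arr2 : List Int) (out : Int) : Decidable (Spec_solution arr1 arr2 out) := by unfold Spec_solution; infer_instance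

-- ===== CLAIM =====
def Claim_equal_solution : Prop := ∀ (arr1 : List Int) (arr2 : List Int), Dom_solution arr1 arr2 → Pre_solution arr1 arr2 → Spec_solution arr1 arr2 (solution arr1 arr2)

-- ===== LEMMAS AND PROOFS =====

-- multiplicity of each value in the deduplicated union
def pvCnt (arr1 arr2 : List Int) (v : Int) : Nat := max (arr1.count v) (arr2.count v)

-- the canonical sorted result: each distinct value v repeated pvCnt v times
def pvCanon (arr1 arr2 : List Int) (keys : List Int) : List Int :=
  keys.flatMap (fun v => List.replicate (pvCnt arr1 arr2 v) v)

lemma pvMerge_mem {s1 s2 : List Int} {z : Int} : z ∈ pvMerge s1 s2 → z ∈ s1 ∨ z ∈ s2 := by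
  fun_induction pvMerge s1 s2 with
  | case1 => exact Or.inr
  | case2 => exact Or.inl
  | case3 x xs y ys hxy ih =>
    intro h
    rcases List.mem_cons.1 h with h | h
    · exact Or.inl (by simp [h])
    · rcases ih h with h' | h'
      · exact Or.inl (List.mem_cons_of_mem _ h')
      · exact Or.inr h'
  | case4 x xs y ys hxy hyx ih =>
    intro h
    rcases List.mem_cons.1 h with h | h
    · exact Or.inr (by simp [h])
    · rcases ih h with h' | h'
      · exact Or.inl h'
      · exact Or.inr (List.mem_cons_of_mem _ h')
  | case5 x xs y ys hxy hyx ih =>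
    intro h
    rcases List.mem_cons.1 h with h | h
    · exact Or.inl (by simp [h])
    · rcases ih h with h' | h'
      · exact Or.inl (List.mem_cons_of_mem _ h')
      · exact Or.inr (List.mem_cons_of_mem _ h')

lemma pvMerge_pairwise {s1 s2 : List Int}
    (h1 : s1.Pairwise (· ≤ ·)) (h2 : s2.Pairwise (· ≤ ·)) :
    (pvMerge s1 s2).Pairwise (· ≤ ·) := by
  fun_induction pvMerge s1 s2 with
  | case1 => exact h2
  | case2 => exact h1
  | case3 x xs y ys hxy ih =>
    rw [List.pairwise_cons] at h1 ⊢
    refine ⟨fun z hz => ?_, ih h1.2 h2⟩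
    rcases pvMerge_mem hz with h | h
    · exact h1.1 z h
    · rcases List.mem_cons.1 h with h | h
      · exact le_of_lt (h ▸ hxy)
      · exact le_of_lt (lt_of_lt_of_le hxy ((List.pairwise_cons.1 h2).1 z h))
  | case4 x xs y ys hxy hyx ih =>
    rw [List.pairwise_cons] at h2 ⊢
    refine ⟨fun z hz => ?_, ih h1 h2.2⟩
    rcases pvMerge_mem hz with h | h
    · rcases List.mem_cons.1 h with h | h
      · exact le_of_lt (h ▸ hyx)
      · exact le_of_lt (lt_of_lt_of_le hyx ((List.pairwise_cons.1 h1).1 z h))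
    · exact h2.1 z h
  | case5 x xs y ys hxy hyx ih =>
    have hxy' : x = y := le_antisymm (not_lt.1 hyx) (not_lt.1 hxy)
    rw [List.pairwise_cons] at h1 h2 ⊢
    refine ⟨fun z hz => ?_, ih h1.2 h2.2⟩
    rcases pvMerge_mem hz with h | h
    · exact h1.1 z h
    · exact hxy' ▸ h2.1 z h

lemma pvMerge_count {s1 s2 : List Int} (v : Int)
    (h1 : s1.Pairwise (· ≤ ·)) (h2 : s2.Pairwise (· ≤ ·)) :
    (pvMerge s1 s2).count v = max (s1.count v) (s2.count v) := by
  fun_induction pvMerge s1 s2 with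
  | case1 => simp
  | case2 => simp
  | case3 x xs y ys hxy ih =>
    have hxny : x ≠ y := ne_of_lt hxy
    have hx0 : ys.count x = 0 := List.count_eq_zero_of_not_mem
      (fun h => absurd (lt_of_lt_of_le hxy ((List.pairwise_cons.1 h2).1 x h)) (lt_irrefl _))
    simp only [List.count_cons, ih (List.pairwise_cons.1 h1).2 h2]
    rcases eq_or_ne x v with hxv | hxv
    · subst hxv
      simp only [beq_self_eq_true, if_true,
        beq_eq_false_iff_ne.2 (Ne.symm hxny), Bool.false_eq_true, if_false]
      omega
    · simp only [beq_eq_false_iff_ne.2 hxv, Bool.false_eq_true, if_false]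
      omega
  | case4 x xs y ys hxy hyx ih =>
    have hynx : y ≠ x := ne_of_lt hyx
    have hy0 : xs.count y = 0 := List.count_eq_zero_of_not_mem
      (fun h => absurd (lt_of_lt_of_le hyx ((List.pairwise_cons.1 h1).1 y h)) (lt_irrefl _))
    simp only [List.count_cons, ih h1 (List.pairwise_cons.1 h2).2]
    rcases eq_or_ne y v with hyv | hyv
    · subst hyv
      simp only [beq_self_eq_true, if_true,
        beq_eq_false_iff_ne.2 (Ne.symm hynx), Bool.false_eq_true, if_false]
      omega
    · simp only [beq_eq_false_iff_ne.2 hyv, Bool.false_eq_true, if_false]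
      omega
  | case5 x xs y ys hxy hyx ih =>
    have hxy' : x = y := le_antisymm (not_lt.1 hyx) (not_lt.1 hxy)
    subst hxy'
    simp only [List.count_cons, ih (List.pairwise_cons.1 h1).2 (List.pairwise_cons.1 h2).2]
    rcases eq_or_ne x v with hxv | hxv
    · subst hxv; simp only [beq_self_eq_true, if_true]; omega
    · simp only [beq_eq_false_iff_ne.2 hxv, Bool.false_eq_true, if_false]; omega

lemma pvSorted_pairwise (xs : List Int) :
    (PySem.List.sorted xs (fun x => x) false).Pairwise (· ≤ ·) := by
  rw [List.pairwise_iff_getElem]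
  intro i j hi hj hij
  exact PySem.List.sorted_id_getElem_mono xs (Nat.le_of_lt hij) hj

lemma pvCanon_count (arr1 arr2 : List Int) {keys : List Int} (hnd : keys.Nodup) (v : Int) :
    (pvCanon arr1 arr2 keys).count v = if v ∈ keys then pvCnt arr1 arr2 v else 0 := by
  induction keys with
  | nil => simp [pvCanon]
  | cons u rest ih =>
    rcases List.nodup_cons.1 hnd with ⟨hu, hrest⟩
    rw [pvCanon, List.flatMap_cons, List.count_append]
    rw [show (List.flatMap (fun v => List.replicate (pvCnt arr1 arr2 v) v) rest) = pvCanon arr1 arr2 rest from rfl]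
    rw [ih hrest, List.count_replicate]
    rcases eq_or_ne u v with huv | huv
    · subst huv
      simp [hu]
    · simp only [beq_eq_false_iff_ne.2 huv, Bool.false_eq_true, if_false, List.mem_cons]
      rcases eq_or_ne v u with h | h
      · exact absurd h.symm huv
      · simp [h]

lemma pvCanon_pairwise (arr1 arr2 : List Int) {keys : List Int}
    (hp : keys.Pairwise (· ≤ ·)) : (pvCanon arr1 arr2 keys).Pairwise (· ≤ ·) := by
  induction keys with
  | nil => simp [pvCanon]
  | cons u rest ih =>
    rcases List.pairwise_cons.1 hp with ⟨hu, hrest⟩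
    rw [pvCanon, List.flatMap_cons]
    rw [List.pairwise_append]
    refine ⟨List.pairwise_replicate.2 (Or.inr le_rfl), ih hrest, ?_⟩
    intro a ha b hb
    rw [List.eq_of_mem_replicate ha]
    rcases List.mem_flatMap.1 hb with ⟨w, hw, hbw⟩
    rw [List.eq_of_mem_replicate hbw]
    exact hu w hw

lemma pvResult_eq_canon (arr1 arr2 : List Int) {keys : List Int}
    (hnd : keys.Nodup) (hp : keys.Pairwise (· ≤ ·))
    (hmem : ∀ v : Int, v ∈ keys ↔ v ∈ arr1 ∨ v ∈ arr2) :
    pvMerge (PySem.List.sorted arr1 (fun x => x) false)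
            (PySem.List.sorted arr2 (fun x => x) false) = pvCanon arr1 arr2 keys := by
  have hsort1 := pvSorted_pairwise arr1
  have hsort2 := pvSorted_pairwise arr2
  refine List.Perm.eq_of_pairwise (fun a b _ _ h h' => le_antisymm h h')
    (pvMerge_pairwise hsort1 hsort2) (pvCanon_pairwise _ _ hp) ?_
  rw [List.perm_iff_count]
  intro v
  rw [pvMerge_count v hsort1 hsort2, pvCanon_count _ _ hnd v,
      (PySem.List.sorted_perm arr1 _ _).count_eq, (PySem.List.sorted_perm arr2 _ _).count_eq]
  by_cases hv : v ∈ keys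
  · simp [hv, pvCnt]
  · have h12 := (Iff.not (hmem v)).1 hv
    push Not at h12
    rw [List.count_eq_zero_of_not_mem h12.1, List.count_eq_zero_of_not_mem h12.2]
    simp [hv]

theorem pvMain (arr1 arr2 : List Int) :
    solution arr1 arr2 = solution_alt arr1 arr2 := by
  simp only [solution, solution_alt]
  set C1 := arr1.foldl (fun d x => d.insert x (d.getD x 0 + 1)) (PySem.Dict.empty : PySem.Dict Int Int) with hC1
  set C2 := arr2.foldl (fun d x => d.insert x (d.getD x 0 + 1)) (PySem.Dict.empty : PySem.Dict Int Int) with hC2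
  set vals := PySem.Set.union (PySem.Set.ofList C1.keys) C2.keys with hvals
  set keys := PySem.List.sorted vals (fun x => x) false with hkeys
  -- the dicts are counters
  have hc1 : ∀ v : Int, C1.getD v 0 = (arr1.count v : Int) := fun v => by
    rw [hC1, PySem.Dict.getD_foldl_insert_add_one]
    rw [PySem.Dict.getD_empty]; ring
  have hc2 : ∀ v : Int, C2.getD v 0 = (arr2.count v : Int) := fun v => by
    rw [hC2, PySem.Dict.getD_foldl_insert_add_one]
    rw [PySem.Dict.getD_empty]; ring
  have hc : ∀ v : Int, max (C1.getD v 0) (C2.getD v 0) = (pvCnt arr1 arr2 v : Int) := fun v => by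
    rw [hc1, hc2, pvCnt]; push_cast; rfl
  -- keys is the sorted nodup list of all values
  have hk1 : C1.keys = PySem.Set.ofList arr1 := by
    rw [hC1, PySem.Dict.foldl_insert_getD_add_one_eq_counter, PySem.Dict.keys_counter]
  have hk2 : C2.keys = PySem.Set.ofList arr2 := by
    rw [hC2, PySem.Dict.foldl_insert_getD_add_one_eq_counter, PySem.Dict.keys_counter]
  have hvmem : ∀ v : Int, v ∈ vals ↔ v ∈ arr1 ∨ v ∈ arr2 := fun v => by
    rw [hvals, PySem.Set.mem_union, PySem.Set.mem_ofList, hk1, hk2,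
        PySem.Set.mem_ofList, PySem.Set.mem_ofList]
  have hvnd : vals.Nodup := hvals ▸
    PySem.Set.nodup_union _ _ (PySem.Set.nodup_ofList _)
  have hperm : keys.Perm vals := PySem.List.sorted_perm vals _ _
  have hknd : keys.Nodup := hperm.nodup_iff.2 hvnd
  have hkmem : ∀ v : Int, v ∈ keys ↔ v ∈ arr1 ∨ v ∈ arr2 := fun v =>
    (hperm.mem_iff).trans (hvmem v)
  have hkp : keys.Pairwise (· ≤ ·) := pvSorted_pairwise vals
  -- B's expansion loop builds exactly the canonical list
  have hmerged : keys.foldl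
      (fun acc v => acc ++ List.replicate (max (C1.getD v 0) (C2.getD v 0)).toNat v) []
      = pvCanon arr1 arr2 keys := by
    rw [PySem.List.foldl_append_eq_flatMap
      (g := fun v => List.replicate (max (C1.getD v 0) (C2.getD v 0)).toNat v)]
    rw [List.nil_append, pvCanon]
    refine List.flatMap_congr (fun v _ => ?_)
    rw [hc v, Int.toNat_natCast]
  -- A's merged result is the same canonical list
  have hres := pvResult_eq_canon arr1 arr2 hknd hkp hkmem
  rw [hres, hmerged]

-- ===== VERDICT (by name: the statement is the Claim_ definition above) =====
theorem solution_spec : Claim_equal_solution := by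
  intro arr1 arr2 _ _
  unfold Spec_solution
  exact pvMain arr1 arr2
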